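-- pv_equiv track=rewrite | github.com/MalasadaTech/ioc-comparer | ioc_comparer.py | get_issuing_org
-- ===== SOURCE A (Python) =====
-- def get_issuing_org(issuer_name):
--     if not issuer_name:
--         return None
--     parts = issuer_name.split(', ')
--     for part in parts:
--         if part.startswith('O='):
--             return part[2:]
--     return None
-- ===== SOURCE B (Python) =====
-- def get_issuing_org(issuer_name):
--     if not issuer_name:
--         return None
--     if issuer_name.startswith('O='):
--         start = 2
--     else:
--         i = issuer_name.find(', O=')
--         if i == -1:
--             return None
--         start = i + 4
--     j = issuer_name.find(', ', start)
--     return issuer_name[start:] if j == -1 else issuer_name[start:j]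
-- ===== Notes on version B (the rewrite author's own statement) =====
-- stated objective: alternative
-- what changed: Replaces split(', ')-then-scan over all parts with direct index arithmetic: find the first segment-start occurrence of 'O=' via str.find and cut its value at the next ', ' with a second find, never materialising the part list.
import Mathlib
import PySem

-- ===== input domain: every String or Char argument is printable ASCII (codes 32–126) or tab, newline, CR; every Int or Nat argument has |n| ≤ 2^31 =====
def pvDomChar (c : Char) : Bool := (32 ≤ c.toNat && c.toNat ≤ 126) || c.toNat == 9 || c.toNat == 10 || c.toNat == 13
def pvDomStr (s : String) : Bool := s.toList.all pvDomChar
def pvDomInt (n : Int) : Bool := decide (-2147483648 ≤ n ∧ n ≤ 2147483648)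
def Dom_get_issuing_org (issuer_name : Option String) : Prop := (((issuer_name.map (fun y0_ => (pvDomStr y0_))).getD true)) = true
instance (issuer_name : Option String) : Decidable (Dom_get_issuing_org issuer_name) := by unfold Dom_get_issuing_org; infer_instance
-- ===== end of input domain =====

-- B replaces split(', ')-then-scan with direct index arithmetic (str.find for the first
-- segment-start 'O=' and a second find for the closing ', '); objective: alternative (same cost).

-- ===== PORT A =====
-- the 'for part in parts: if part.startswith("O="): return part[2:]' loop
def pvLoopA : List String → Option String
  | [] => none
  | p :: ps =>
    if PySem.Str.startswith p "O=" then some (PySem.Str.slice p (some 2) none)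
    else pvLoopA ps

def get_issuing_org (issuer_name : Option String) : Option String :=
  match issuer_name with
  | none => none
  | some s =>
    if s = "" then none                      -- 'if not issuer_name'
    else
      match PySem.Str.split? s ", " with     -- sep ", " is nonempty, so the none branch is unreachable
      | none => none
      | some parts => pvLoopA parts

-- ===== PORT B =====
-- Source B's last two lines (the value once the segment start is known):
-- j = issuer_name.find(', ', start); return issuer_name[start:] if j == -1 else issuer_name[start:j]
def pvTailB (s : String) (start : Int) : Option String :=
  let j := PySem.Str.findFrom s ", " start
  if j = -1 then some (PySem.Str.slice s (some start) none)
  else some (PySem.Str.slice s (some start) (some j))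

def get_issuing_org_alt (issuer_name : Option String) : Option String :=
  match issuer_name with
  | none => none
  | some s =>
    if s = "" then none                      -- 'if not issuer_name'
    else if PySem.Str.startswith s "O=" then pvTailB s 2
    else
      let i := PySem.Str.find s ", O="
      if i = -1 then none else pvTailB s (i + 4)

-- ===== PRECONDITION & SPEC =====
def Spec_get_issuing_org (issuer_name : Option String) (out : Option String) : Prop := out = get_issuing_org_alt issuer_name
instance (issuer_name : Option String) (out : Option String) : Decidable (Spec_get_issuing_org issuer_name out) := by unfold Spec_get_issuing_org; infer_instance

-- ===== CLAIM (what is proved, stated in full; the proofs are below) =====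
def Claim_equal_get_issuing_org : Prop := ∀ (issuer_name : Option String), Dom_get_issuing_org issuer_name → Spec_get_issuing_org issuer_name (get_issuing_org issuer_name)

-- ===== LEMMAS AND PROOFS =====

-- Char-level mirrors of the two computations
def pvSep : List Char := [',', ' ']
def pvOE : List Char := ['O', '=']
def pvCO : List Char := [',', ' ', 'O', '=']

def pvFirstO : List (List Char) → Option (List Char)
  | [] => none
  | p :: ps => if pvOE.isPrefixOf p then some (p.drop 2) else pvFirstO ps

/-- value of a segment: up to the next `', '` (or the end). -/
def pvCut (xs : List Char) : List Char :=
  if PySem.Chars.find xs pvSep = -1 then xs else xs.take (PySem.Chars.find xs pvSep).toNat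

def pvB (cs : List Char) : Option (List Char) :=
  if pvOE.isPrefixOf cs then some (pvCut (cs.drop 2))
  else if PySem.Chars.find cs pvCO = -1 then none
  else some (pvCut (cs.drop ((PySem.Chars.find cs pvCO).toNat + 4)))

-- ---- generic facts about PySem.Chars.find ----

lemma pvFindGo (sub : List Char) : ∀ (l : List Char) (k : Nat),
    PySem.Chars.find.go sub l k =
      if PySem.Chars.find l sub = -1 then -1 else (k : Int) + PySem.Chars.find l sub := by
  intro l
  induction l with
  | nil =>
    intro k
    show (if sub.isEmpty then (k:Int) else -1) = _
    have h0 : PySem.Chars.find [] sub = if sub.isEmpty then (0:Int) else -1 := rfl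
    rw [h0]
    by_cases he : sub.isEmpty <;> simp [he]
  | cons c t ih =>
    intro k
    show (if sub.isPrefixOf (c::t) then (k:Int) else PySem.Chars.find.go sub t (k+1)) = _
    have hfind : PySem.Chars.find (c::t) sub =
        (if sub.isPrefixOf (c::t) then (0:Int) else PySem.Chars.find.go sub t 1) := rfl
    by_cases hp : sub.isPrefixOf (c::t)
    · simp [hp, hfind]
    · rw [if_neg hp, hfind, if_neg hp, ih (k+1), ih 1]
      have hge := PySem.Chars.neg_one_le_find t sub
      by_cases h1 : PySem.Chars.find t sub = -1
      · simp [h1]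
      · have h2 : ¬ (((1:Nat):Int) + PySem.Chars.find t sub = -1) := by omega
        rw [if_neg h1, if_neg h1, if_neg h2]
        push_cast; ring

lemma pvFind_cons_pos {sub : List Char} {c : Char} {t : List Char}
    (h : sub.isPrefixOf (c::t)) : PySem.Chars.find (c::t) sub = 0 := by
  show (if sub.isPrefixOf (c::t) then (0:Int) else PySem.Chars.find.go sub t 1) = 0
  simp [h]

lemma pvFind_cons_neg {sub : List Char} {c : Char} {t : List Char}
    (h : ¬ sub.isPrefixOf (c::t)) :
    PySem.Chars.find (c::t) sub =
      if PySem.Chars.find t sub = -1 then -1 else 1 + PySem.Chars.find t sub := by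
  show (if sub.isPrefixOf (c::t) then (0:Int) else PySem.Chars.find.go sub t 1) = _
  rw [if_neg h, pvFindGo]
  split_ifs <;> simp

lemma pvFind_nil {sub : List Char} (h : sub ≠ []) : PySem.Chars.find [] sub = -1 := by
  show (if sub.isEmpty then (0:Int) else -1) = -1
  simp [List.isEmpty_iff, h]

lemma pvNotInfix (sub s : List Char) : (¬ sub <:+: s) ↔ ∀ q, ¬ sub <+: s.drop q := by
  rw [← PySem.Chars.isIn_iff_infix, ← PySem.Chars.exists_prefix_drop_iff_isIn]
  push Not; rfl

lemma pvFind_neg_iff (s sub : List Char) :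
    PySem.Chars.find s sub = -1 ↔ ∀ q, ¬ sub <+: s.drop q := by
  rw [PySem.Chars.find_eq_neg_one_iff, pvNotInfix]

lemma pvFind_eq_of_first {s sub : List Char} {p : Nat}
    (h1 : sub <+: s.drop p) (h2 : ∀ q < p, ¬ sub <+: s.drop q) :
    PySem.Chars.find s sub = (p : Int) := by
  have hin : sub <:+: s := by
    rw [← PySem.Chars.isIn_iff_infix, ← PySem.Chars.exists_prefix_drop_iff_isIn]
    exact ⟨p, h1⟩
  have hnn : 0 ≤ PySem.Chars.find s sub := (PySem.Chars.find_nonneg_iff s sub).2 hin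
  obtain ⟨hpre, hmin⟩ := PySem.Chars.find_spec hnn
  have hne : (PySem.Chars.find s sub).toNat = p := by
    by_contra hne
    rcases Nat.lt_or_ge (PySem.Chars.find s sub).toNat p with hlt | hge
    · exact h2 _ hlt hpre
    · exact hmin p (by omega) h1
  omega

lemma pvFind_eq_nat {s sub : List Char} (h : PySem.Chars.find s sub ≠ -1) :
    ∃ k : Nat, PySem.Chars.find s sub = (k : Int) ∧
      sub <+: s.drop k ∧ ∀ q < k, ¬ sub <+: s.drop q := by
  have hge := PySem.Chars.neg_one_le_find s sub
  have hnn : 0 ≤ PySem.Chars.find s sub := by omega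
  obtain ⟨hpre, hmin⟩ := PySem.Chars.find_spec hnn
  exact ⟨(PySem.Chars.find s sub).toNat, by omega, hpre, hmin⟩

-- ---- structural facts about PySem.Chars.splitOn ----

def pvModHead (pre : List Char) : List (List Char) → List (List Char)
  | [] => [pre]
  | p :: ps => (pre ++ p) :: ps

lemma pvGoZero (sep l cur : List Char) (acc : List (List Char)) :
    PySem.Chars.splitOn.go sep 0 l cur acc = ((cur.reverse ++ l) :: acc).reverse := rfl

lemma pvGoSuccNil (sep cur : List Char) (f : Nat) (acc : List (List Char)) :
    PySem.Chars.splitOn.go sep (f+1) [] cur acc = (cur.reverse :: acc).reverse := rfl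

lemma pvGoSuccCons (sep : List Char) (f : Nat) (c : Char) (rest cur : List Char) (acc : List (List Char)) :
    PySem.Chars.splitOn.go sep (f+1) (c::rest) cur acc =
      if sep.isPrefixOf (c::rest) then
        PySem.Chars.splitOn.go sep f (List.drop sep.length (c::rest)) [] (cur.reverse :: acc)
      else PySem.Chars.splitOn.go sep f rest (c::cur) acc := rfl

lemma pvGoAcc (sep : List Char) : ∀ (f : Nat) (l cur : List Char) (acc : List (List Char)),
    PySem.Chars.splitOn.go sep f l cur acc =
      acc.reverse ++ pvModHead cur.reverse (PySem.Chars.splitOn.go sep f l [] []) := by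
  intro f
  induction f with
  | zero => intro l cur acc; rw [pvGoZero, pvGoZero]; simp [pvModHead]
  | succ f ih =>
    intro l cur acc
    cases l with
    | nil => rw [pvGoSuccNil, pvGoSuccNil]; simp [pvModHead]
    | cons c rest =>
      rw [pvGoSuccCons, pvGoSuccCons]
      by_cases hp : sep.isPrefixOf (c::rest)
      · rw [if_pos hp, if_pos hp,
          ih (List.drop sep.length (c::rest)) [] (cur.reverse :: acc),
          ih (List.drop sep.length (c::rest)) [] (([] : List Char).reverse :: [])]
        cases PySem.Chars.splitOn.go sep f (List.drop sep.length (c::rest)) [] [] with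
        | nil => simp [pvModHead]
        | cons p ps => simp [pvModHead]
      · rw [if_neg hp, if_neg hp, ih rest (c::cur) acc, ih rest [c] []]
        cases PySem.Chars.splitOn.go sep f rest [] [] with
        | nil => simp [pvModHead]
        | cons p ps => simp [pvModHead]

lemma pvGoFuel {sep : List Char} (hsep : sep ≠ []) :
    ∀ (f f' : Nat) (l cur : List Char) (acc : List (List Char)),
      l.length ≤ f → l.length ≤ f' →
      PySem.Chars.splitOn.go sep f l cur acc = PySem.Chars.splitOn.go sep f' l cur acc := by
  have hslen : 1 ≤ sep.length := by
    cases sep with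
    | nil => exact absurd rfl hsep
    | cons a as => simp
  intro f
  induction f with
  | zero =>
    intro f' l cur acc h1 _
    have hl : l = [] := by cases l <;> simp_all
    subst hl
    cases f' with
    | zero => rfl
    | succ g => rw [pvGoZero, pvGoSuccNil]; simp
  | succ f ih =>
    intro f' l cur acc h1 h2
    cases l with
    | nil =>
      cases f' with
      | zero => rw [pvGoZero, pvGoSuccNil]; simp
      | succ g => rfl
    | cons c rest =>
      have h1' : rest.length + 1 ≤ f + 1 := by simpa using h1
      cases f' with
      | zero => simp at h2
      | succ g =>
        have h2' : rest.length + 1 ≤ g + 1 := by simpa using h2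
        rw [pvGoSuccCons, pvGoSuccCons]
        by_cases hp : sep.isPrefixOf (c::rest)
        · rw [if_pos hp, if_pos hp]
          apply ih
          · simp only [List.length_drop, List.length_cons]; omega
          · simp only [List.length_drop, List.length_cons]; omega
        · rw [if_neg hp, if_neg hp]
          apply ih <;> omega

lemma pvSplitOn_nil (sep : List Char) : PySem.Chars.splitOn [] sep = [[]] := rfl

lemma pvSplitOn_ne_nil (l sep : List Char) : PySem.Chars.splitOn l sep ≠ [] := by
  show PySem.Chars.splitOn.go sep (l.length + 1) l [] [] ≠ []
  rw [pvGoAcc]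
  cases PySem.Chars.splitOn.go sep (l.length + 1) l [] [] with
  | nil => simp [pvModHead]
  | cons p ps => simp [pvModHead]

lemma pvSplitOn_go_eq (sep : List Char) (hsep : sep ≠ []) (l : List Char) (f : Nat)
    (h : l.length ≤ f) :
    PySem.Chars.splitOn.go sep f l [] [] = PySem.Chars.splitOn l sep := by
  exact pvGoFuel hsep f (l.length + 1) l [] [] h (by omega)

lemma pvSplitOn_prefix {sep l : List Char} (hsep : sep ≠ []) (h : sep.isPrefixOf l) :
    PySem.Chars.splitOn l sep = [] :: PySem.Chars.splitOn (l.drop sep.length) sep := by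
  cases l with
  | nil => exact absurd (List.prefix_nil.mp (List.isPrefixOf_iff_prefix.1 h)) hsep
  | cons c rest =>
    have hslen : 1 ≤ sep.length := by
      cases sep with
      | nil => exact absurd rfl hsep
      | cons a as => simp
    show PySem.Chars.splitOn.go sep ((c::rest).length + 1) (c::rest) [] [] = _
    rw [pvGoSuccCons, if_pos h, pvGoAcc,
      pvSplitOn_go_eq sep hsep _ _ (by simp only [List.length_drop, List.length_cons]; omega)]
    cases hsp : PySem.Chars.splitOn (List.drop sep.length (c::rest)) sep with
    | nil => exact absurd hsp (pvSplitOn_ne_nil _ _)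
    | cons p ps => simp [pvModHead]

lemma pvSplitOn_cons {sep : List Char} {c : Char} {rest : List Char}
    (h : ¬ sep.isPrefixOf (c::rest)) :
    PySem.Chars.splitOn (c::rest) sep = pvModHead [c] (PySem.Chars.splitOn rest sep) := by
  show PySem.Chars.splitOn.go sep ((c::rest).length + 1) (c::rest) [] [] = _
  rw [pvGoSuccCons, if_neg h, pvGoAcc]
  have hsep : sep ≠ [] := by
    intro hh; subst hh; simp [List.isPrefixOf] at h
  rw [pvSplitOn_go_eq sep hsep rest ((c::rest).length) (by simp)]
  simp [pvModHead]

lemma pvSplitOn_of_find_neg {sep : List Char} (_hsep : sep ≠ []) :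
    ∀ {l : List Char}, PySem.Chars.find l sep = -1 → PySem.Chars.splitOn l sep = [l] := by
  intro l
  induction l with
  | nil => intro _; exact pvSplitOn_nil sep
  | cons c rest ih =>
    intro h
    have hp : ¬ sep.isPrefixOf (c::rest) := by
      intro hp
      rw [pvFind_cons_pos hp] at h; simp at h
    rw [pvSplitOn_cons hp]
    have hrest : PySem.Chars.find rest sep = -1 := by
      rw [pvFind_cons_neg hp] at h
      by_contra hne
      rw [if_neg hne] at h
      have := PySem.Chars.neg_one_le_find rest sep
      omega
    rw [ih hrest]; simp [pvModHead]

lemma pvSplitOn_of_find {sep : List Char} (hsep : sep ≠ []) :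
    ∀ (l : List Char) (k : Nat), PySem.Chars.find l sep = (k : Int) →
      PySem.Chars.splitOn l sep =
        l.take k :: PySem.Chars.splitOn (l.drop (k + sep.length)) sep := by
  intro l
  induction l with
  | nil =>
    intro k h
    rw [pvFind_nil hsep] at h; omega
  | cons c rest ih =>
    intro k h
    by_cases hp : sep.isPrefixOf (c::rest)
    · rw [pvFind_cons_pos hp] at h
      have hk : k = 0 := by omega
      subst hk
      rw [pvSplitOn_prefix hsep hp]; simp
    · rw [pvFind_cons_neg hp] at h
      have hne : PySem.Chars.find rest sep ≠ -1 := by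
        by_contra hh; rw [if_pos hh] at h; omega
      rw [if_neg hne] at h
      have hge := PySem.Chars.neg_one_le_find rest sep
      have hk1 : 1 ≤ k := by omega
      have hrest : PySem.Chars.find rest sep = ((k - 1 : Nat) : Int) := by omega
      rw [pvSplitOn_cons hp, ih (k-1) hrest]
      have htake : (c::rest).take k = c :: rest.take (k-1) := by
        cases k with
        | zero => omega
        | succ k' => simp
      have hdrop : (c::rest).drop (k + sep.length) = rest.drop (k - 1 + sep.length) := by
        cases k with
        | zero => omega
        | succ k' => simp [Nat.succ_add]
      rw [htake, hdrop]; simp [pvModHead]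

-- ---- the char-level equivalence ----

lemma pvSep_ne : pvSep ≠ [] := by decide

lemma pvCO_eq : pvCO = pvSep ++ pvOE := by decide

lemma pvMain : ∀ (n : Nat) (cs : List Char), cs.length ≤ n →
    pvFirstO (PySem.Chars.splitOn cs pvSep) = pvB cs := by
  intro n
  induction n with
  | zero =>
    intro cs h
    have : cs = [] := by cases cs <;> simp_all
    subst this; decide
  | succ n ih =>
    intro cs hlen
    by_cases hoe : pvOE.isPrefixOf cs
    · -- cs = 'O' :: '=' :: t
      obtain ⟨t, ht⟩ := List.isPrefixOf_iff_prefix.1 hoe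
      have hsh : pvOE ++ t = 'O' :: '=' :: t := rfl
      rw [hsh] at ht
      subst ht
      have hnp1 : ¬ pvSep.isPrefixOf ('O' :: '=' :: t) := by simp [pvSep, List.isPrefixOf]
      have hnp2 : ¬ pvSep.isPrefixOf ('=' :: t) := by simp [pvSep, List.isPrefixOf]
      by_cases hft : PySem.Chars.find t pvSep = -1
      · have hfcs : PySem.Chars.find ('O' :: '=' :: t) pvSep = -1 := by
          rw [pvFind_cons_neg hnp1, pvFind_cons_neg hnp2, if_pos hft]; simp
        rw [pvSplitOn_of_find_neg pvSep_ne hfcs]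
        simp only [pvFirstO, pvB, pvCut]
        rw [if_pos hoe, if_pos hoe,
          show List.drop 2 ('O'::'='::t) = t from rfl, if_pos hft]
      · obtain ⟨f, hf, -, -⟩ := pvFind_eq_nat hft
        have hfcs : PySem.Chars.find ('O' :: '=' :: t) pvSep = ((f + 2 : Nat) : Int) := by
          rw [pvFind_cons_neg hnp1, pvFind_cons_neg hnp2, if_neg hft, hf]
          have h2 : (1 : Int) + (f : Int) ≠ -1 := by omega
          rw [if_neg h2]; push_cast; ring
        rw [pvSplitOn_of_find pvSep_ne _ _ hfcs]
        have htake : List.take (f+2) ('O'::'='::t) = 'O'::'='::List.take f t := rfl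
        simp only [pvFirstO, pvB, pvCut, htake]
        have hOEt : pvOE.isPrefixOf ('O'::'='::List.take f t) := by
          simp [pvOE, List.isPrefixOf]
        rw [if_pos hOEt, if_pos hoe,
          show List.drop 2 ('O'::'='::List.take f t) = List.take f t from rfl,
          show List.drop 2 ('O'::'='::t) = t from rfl, if_neg hft, hf]
        simp
    · by_cases hfs : PySem.Chars.find cs pvSep = -1
      · rw [pvSplitOn_of_find_neg pvSep_ne hfs]
        have hfco : PySem.Chars.find cs pvCO = -1 := by
          rw [pvFind_neg_iff]
          intro q hq
          have hsp : pvSep <+: cs.drop q := by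
            rw [pvCO_eq] at hq
            exact (List.prefix_append pvSep pvOE).trans hq
          exact (pvFind_neg_iff cs pvSep).1 hfs q hsp
        simp only [pvFirstO, pvB]
        rw [if_neg hoe, if_neg hoe, hfco]
        simp
      · obtain ⟨k, hk, hkpre, hkmin⟩ := pvFind_eq_nat hfs
        rw [pvSplitOn_of_find pvSep_ne _ k hk,
          show pvSep.length = 2 from rfl]
        have hhd : ¬ pvOE.isPrefixOf (cs.take k) := by
          intro hh
          exact hoe (List.isPrefixOf_iff_prefix.2
            ((List.isPrefixOf_iff_prefix.1 hh).trans (List.take_prefix k cs)))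
        simp only [pvFirstO]
        rw [if_neg hhd]
        obtain ⟨u, hu⟩ := hkpre
        set r := cs.drop (k + 2) with hr
        have hklen : k + 2 ≤ cs.length := by
          have h1 := List.IsPrefix.length_le ⟨u, hu⟩
          rw [List.length_drop] at h1
          have h2 : pvSep.length = 2 := rfl
          omega
        have hdk : cs.drop k = ',' :: ' ' :: r := by
          have h2 : r = List.drop 2 (List.drop k cs) := by
            rw [List.drop_drop, hr]
          rw [h2, ← hu]; rfl
        have hrlen : r.length ≤ n := by
          rw [hr, List.length_drop]; omega
        have hIH : pvFirstO (PySem.Chars.splitOn r pvSep) = pvB r := ih r hrlen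
        have hdkq : ∀ q, cs.drop (k + 2 + q) = r.drop q := by
          intro q; rw [hr, List.drop_drop]
        have hq_lt : ∀ q < k, ¬ pvCO <+: cs.drop q := by
          intro q hq hco
          exact hkmin q hq (by rw [pvCO_eq] at hco; exact (List.prefix_append pvSep pvOE).trans hco)
        have hq_k1 : ¬ pvCO <+: cs.drop (k + 1) := by
          have hd1 : cs.drop (k + 1) = ' ' :: r := by
            have : cs.drop (k + 1) = List.drop 1 (List.drop k cs) := by rw [List.drop_drop]
            rw [this, hdk]; rfl
          rw [hd1]
          rintro ⟨w, hw⟩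
          simp [pvCO] at hw
        have hq_k : pvCO <+: cs.drop k ↔ pvOE <+: r := by
          rw [hdk]
          constructor
          · rintro ⟨w, hw⟩
            refine ⟨w, ?_⟩
            have hw2 : ('O'::'='::w : List Char) = r := by simpa [pvCO] using hw
            exact hw2
          · rintro ⟨w, hw⟩
            exact ⟨w, by rw [← hw]; rfl⟩
        rw [hIH]
        by_cases hoer : pvOE.isPrefixOf r
        · have hfco : PySem.Chars.find cs pvCO = (k : Int) :=
            pvFind_eq_of_first (hq_k.2 (List.isPrefixOf_iff_prefix.1 hoer)) hq_lt
          have hfco_ne : PySem.Chars.find cs pvCO ≠ -1 := by rw [hfco]; omega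
          unfold pvB
          rw [if_pos hoer, if_neg hoe, if_neg hfco_ne, hfco,
            show ((k : Int).toNat + 4) = k + 2 + 2 by omega, hdkq 2]
        · have hocc : ∀ q, pvCO <+: cs.drop q → ∃ q', q = k + 2 + q' ∧ pvCO <+: r.drop q' := by
            intro q hq
            rcases Nat.lt_or_ge q k with h1 | h1
            · exact absurd hq (hq_lt q h1)
            · rcases Nat.eq_or_lt_of_le h1 with h2 | h2
              · exact absurd (hq_k.1 (h2 ▸ hq)) (fun hh => hoer (List.isPrefixOf_iff_prefix.2 hh))
              · rcases Nat.eq_or_lt_of_le h2 with h3 | h3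
                · rw [← h3] at hq
                  exact absurd hq hq_k1
                · refine ⟨q - (k + 2), by omega, ?_⟩
                  rw [← hdkq, show k + 2 + (q - (k + 2)) = q by omega]
                  exact hq
          by_cases hg : PySem.Chars.find r pvCO = -1
          · have hfco : PySem.Chars.find cs pvCO = -1 := by
              rw [pvFind_neg_iff]
              intro q hq
              obtain ⟨q', _, hq'⟩ := hocc q hq
              exact (pvFind_neg_iff r pvCO).1 hg q' hq'
            unfold pvB
            rw [if_neg hoer, if_neg hoe, hfco, hg]
            simp
          · obtain ⟨g, hgv, hgpre, hgmin⟩ := pvFind_eq_nat hg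
            have hfco : PySem.Chars.find cs pvCO = ((k + 2 + g : Nat) : Int) := by
              apply pvFind_eq_of_first
              · rw [hdkq]; exact hgpre
              · intro q hq hco
                obtain ⟨q', hq'e, hq'⟩ := hocc q hco
                exact hgmin q' (by omega) hq'
            have hfco_ne : PySem.Chars.find cs pvCO ≠ -1 := by rw [hfco]; omega
            unfold pvB
            rw [if_neg hoer, if_neg hoe, if_neg hg, if_neg hfco_ne, hfco, hgv,
              show (((k + 2 + g : Nat) : Int).toNat + 4) = k + 2 + (g + 4) by omega,
              hdkq (g + 4),
              show (((g : Nat) : Int).toNat + 4) = g + 4 by omega]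

-- ---- bridging the String-level ports to the char level ----

lemma pvStrEq {s t : String} (h : s.toList = t.toList) : s = t := String.toList_inj.1 h

lemma pvOEtoList : ("O=" : String).toList = pvOE := by decide

lemma pvLoopA_eq (parts : List String) :
    pvLoopA parts = (pvFirstO (parts.map String.toList)).map String.ofList := by
  induction parts with
  | nil => rfl
  | cons p ps ih =>
    simp only [pvLoopA, List.map, pvFirstO]
    have hcond : PySem.Str.startswith p "O=" = pvOE.isPrefixOf p.toList := by
      rw [PySem.Str.startswith_eq, pvOEtoList]; rfl
    rw [hcond]
    by_cases hp : pvOE.isPrefixOf p.toList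
    · rw [if_pos hp, if_pos hp]
      simp only [Option.map_some]
      congr 1
      apply pvStrEq
      rw [String.toList_ofList, PySem.Str.toList_slice, PySem.Chars.slice_eq_listSlice,
        PySem.List.slice_from p.toList (by omega : (0:Int) ≤ 2)]
      rfl
    · rw [if_neg hp, if_neg hp, ih]

lemma pvTail_eq (s : String) (st : Nat) (hst : st ≤ s.toList.length) :
    pvTailB s (st : Int) = some (String.ofList (pvCut (s.toList.drop st))) := by
  have hsep : (", " : String).toList = pvSep := by decide
  have hj : PySem.Str.findFrom s ", " (st : Int) =
      (if PySem.Chars.find (s.toList.drop st) pvSep = -1 then -1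
       else (st : Int) + PySem.Chars.find (s.toList.drop st) pvSep) := by
    rw [PySem.Str.findFrom_eq, hsep]
    exact PySem.Chars.findFrom_natCast s.toList pvSep st hst
  show (if PySem.Str.findFrom s ", " (st:Int) = -1
        then some (PySem.Str.slice s (some (st:Int)) none)
        else some (PySem.Str.slice s (some (st:Int)) (some (PySem.Str.findFrom s ", " (st:Int)))))
      = some (String.ofList (pvCut (s.toList.drop st)))
  rw [hj]
  by_cases hf : PySem.Chars.find (s.toList.drop st) pvSep = -1
  · rw [if_pos hf, if_pos rfl]
    congr 1
    apply pvStrEq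
    rw [String.toList_ofList, PySem.Str.toList_slice, PySem.Chars.slice_eq_listSlice,
      PySem.List.slice_from s.toList (Int.natCast_nonneg st)]
    simp [pvCut, hf]
  · have hge := PySem.Chars.neg_one_le_find (s.toList.drop st) pvSep
    have hf0 : 0 ≤ PySem.Chars.find (s.toList.drop st) pvSep := by omega
    have hne : (st : Int) + PySem.Chars.find (s.toList.drop st) pvSep ≠ -1 := by omega
    rw [if_neg hf, if_neg hne]
    congr 1
    apply pvStrEq
    rw [String.toList_ofList, PySem.Str.toList_slice, PySem.Chars.slice_eq_listSlice,
      PySem.List.slice_toNat s.toList (Int.natCast_nonneg st) (by omega)]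
    simp only [pvCut, if_neg hf]
    rw [show ((st : Int)).toNat = st by omega]
    congr 1
    omega

lemma pvAltB (s : String) : get_issuing_org_alt (some s) =
    if s = "" then none else (pvB s.toList).map String.ofList := by
  by_cases hs : s = ""
  · simp [get_issuing_org_alt, hs]
  · simp only [get_issuing_org_alt, if_neg hs]
    have hcond : PySem.Str.startswith s "O=" = pvOE.isPrefixOf s.toList := by
      rw [PySem.Str.startswith_eq, pvOEtoList]; rfl
    have hco : (", O=" : String).toList = pvCO := by decide
    rw [hcond]
    by_cases hoe : pvOE.isPrefixOf s.toList
    · rw [if_pos hoe]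
      have hst : 2 ≤ s.toList.length := by
        have h1 := (List.isPrefixOf_iff_prefix.1 hoe).length_le
        have h2 : pvOE.length = 2 := rfl
        omega
      rw [show (2 : Int) = ((2 : Nat) : Int) from rfl, pvTail_eq s 2 hst]
      unfold pvB
      rw [if_pos hoe]
      rfl
    · rw [if_neg hoe, PySem.Str.find_eq, hco]
      by_cases hfc : PySem.Chars.find s.toList pvCO = -1
      · rw [if_pos hfc]
        unfold pvB
        rw [if_neg hoe, hfc]
        simp
      · rw [if_neg hfc]
        obtain ⟨i, hi, hipre, -⟩ := pvFind_eq_nat hfc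
        have hilen : i + 4 ≤ s.toList.length := by
          have h1 := hipre.length_le
          rw [List.length_drop] at h1
          have h2 : pvCO.length = 4 := rfl
          omega
        rw [hi, show ((i : Int) + 4) = ((i + 4 : Nat) : Int) by push_cast; ring,
          pvTail_eq s (i + 4) hilen]
        unfold pvB
        rw [if_neg hoe, if_neg hfc, hi,
          show (((i : Nat) : Int).toNat + 4) = i + 4 by omega]
        rfl

-- ===== VERDICT (by name: the statement is the Claim_ definition above) =====
theorem get_issuing_org_spec : Claim_equal_get_issuing_org := by
  intro issuer_name _
  unfold Spec_get_issuing_org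
  cases issuer_name with
  | none => rfl
  | some s =>
    rw [pvAltB]
    by_cases hs : s = ""
    · simp [get_issuing_org, hs]
    · simp only [get_issuing_org, if_neg hs]
      have hsep : (", " : String).toList = pvSep := by decide
      have hsplit := PySem.Str.split?_map s ", "
      rw [hsep] at hsplit
      have hsome : PySem.Chars.split? s.toList pvSep =
          some (PySem.Chars.splitOn s.toList pvSep) := by
        simp [PySem.Chars.split?, pvSep]
      rw [hsome] at hsplit
      cases hps : PySem.Str.split? s ", " with
      | none => rw [hps] at hsplit; simp at hsplit
      | some parts =>
        rw [hps] at hsplit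
        simp only [Option.map_some, Option.some.injEq] at hsplit
        show pvLoopA parts = Option.map String.ofList (pvB s.toList)
        rw [pvLoopA_eq, hsplit, pvMain s.toList.length s.toList le_rfl]
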